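-- pv_equiv track=rewrite | github.com/Sheeba1907/python_assignment | src/No_idea/util.py | add_happiness
-- ===== SOURCE A (Python) =====
-- def add_happiness(array, set_like, set_dislike):
--
--     happiness = 0
--     for val in array:
--         if val in set_like:
--             happiness += 1
--         elif val in set_dislike:
--             happiness -= 1
--     return happiness
-- ===== SOURCE B (Python) =====
-- def add_happiness(array, set_like, set_dislike):
--     # Aggregate by value: count occurrences once, then iterate the (small)
--     # sets, not the array: total = sum of counts over liked values minus
--     # sum of counts over values disliked but not liked.
--     counts = {}
--     for val in array:
--         counts[val] = counts.get(val, 0) + 1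
--     likes = set(set_like)
--     dislikes_only = set(set_dislike) - likes
--     return sum(counts.get(x, 0) for x in likes) - sum(counts.get(x, 0) for x in dislikes_only)
-- ===== Notes on version B (the rewrite author's own statement) =====
-- stated objective: alternative
-- what changed: B inverts the iteration: it builds a frequency counter of the array once, forms the liked set and the set-difference dislike-minus-like, and computes the answer as (sum of counts over liked values) minus (sum of counts over disliked-only values), instead of A's per-array-element membership scan.
import Mathlib
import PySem

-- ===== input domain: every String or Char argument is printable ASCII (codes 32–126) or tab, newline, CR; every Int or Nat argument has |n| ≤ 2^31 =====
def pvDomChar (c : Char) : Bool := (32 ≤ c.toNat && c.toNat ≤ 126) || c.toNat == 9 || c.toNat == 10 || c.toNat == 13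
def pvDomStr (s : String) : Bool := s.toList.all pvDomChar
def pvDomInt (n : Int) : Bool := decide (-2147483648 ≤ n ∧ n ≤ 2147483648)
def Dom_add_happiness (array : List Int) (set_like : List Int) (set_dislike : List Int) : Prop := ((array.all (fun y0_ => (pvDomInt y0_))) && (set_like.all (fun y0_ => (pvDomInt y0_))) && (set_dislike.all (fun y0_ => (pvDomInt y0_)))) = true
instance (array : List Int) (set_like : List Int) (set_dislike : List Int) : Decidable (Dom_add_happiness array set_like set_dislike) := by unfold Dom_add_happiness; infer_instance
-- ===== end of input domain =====

-- B aggregates by value (frequency counter + set arithmetic) instead of A's per-element membership scan; objective: alternative algorithm.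

-- ===== PORT A =====
-- literal port of A: fold over array, two membership branches per element
def add_happiness (array : List Int) (set_like : List Int) (set_dislike : List Int) : Int :=
  array.foldl (fun happiness val =>
    if val ∈ set_like then happiness + 1
    else if val ∈ set_dislike then happiness - 1
    else happiness) 0

-- ===== PORT B =====
-- port of B: counts = frequency dict of array; likes = set(set_like);
-- dislikes_only = set(set_dislike) - likes; answer = Σ counts over likes − Σ counts over dislikes_only
def add_happiness_alt (array : List Int) (set_like : List Int) (set_dislike : List Int) : Int :=
  let counts := array.foldl (fun d val => d.insert val (d.getD val 0 + 1)) PySem.Dict.empty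
  let likes : PySem.Set Int := PySem.Set.ofList set_like
  let dislikes_only : PySem.Set Int := PySem.Set.diff (PySem.Set.ofList set_dislike) likes
  (likes.map (fun x => counts.getD x 0)).sum - (dislikes_only.map (fun x => counts.getD x 0)).sum

-- ===== PRECONDITION & SPEC =====
def Spec_add_happiness (array : List Int) (set_like : List Int) (set_dislike : List Int) (out : Int) : Prop := out = add_happiness_alt array set_like set_dislike
instance (array : List Int) (set_like : List Int) (set_dislike : List Int) (out : Int) : Decidable (Spec_add_happiness array set_like set_dislike out) := by unfold Spec_add_happiness; infer_instance

-- ===== CLAIM (what is proved, stated in full; the proofs are below) =====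
def Claim_equal_add_happiness : Prop := ∀ (array : List Int) (set_like : List Int) (set_dislike : List Int), Dom_add_happiness array set_like set_dislike → Spec_add_happiness array set_like set_dislike (add_happiness array set_like set_dislike)

-- ===== LEMMAS AND PROOFS =====

-- indicator sum over a duplicate-free list
theorem sum_indicator (v : Int) (L : List Int) (hL : L.Nodup) :
    (L.map (fun x => if v = x then (1 : Int) else 0)).sum = if v ∈ L then 1 else 0 := by
  induction L with
  | nil => simp
  | cons x t ih =>
    rcases List.nodup_cons.mp hL with ⟨hx, ht⟩
    by_cases h : v = x
    · subst h
      simp [ih ht, hx]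
    · simp [h, ih ht]

-- Σ_{x ∈ L} count(x, a) = |{v ∈ a : v ∈ L}| for duplicate-free L
theorem sum_counts (L : List Int) (hL : L.Nodup) (a : List Int) :
    (L.map (fun x => (a.count x : Int))).sum
      = ((a.filter (fun v => decide (v ∈ L))).length : Int) := by
  induction a with
  | nil => simp
  | cons h t ih =>
    have hsplit : (L.map (fun x => ((h :: t).count x : Int))).sum
        = (L.map (fun x => (t.count x : Int))).sum
          + (L.map (fun x => if h = x then (1 : Int) else 0)).sum := by
      rw [← List.sum_map_add]
      congr 1
      apply List.map_congr_left
      intro x _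
      rw [List.count_cons]
      by_cases hxh : x = h
      · simp [hxh]
      · simp [Ne.symm hxh]
    rw [hsplit, ih, sum_indicator h L hL]
    by_cases hm : h ∈ L <;> simp [hm]

-- characterisation of A as a difference of two filter lengths
theorem a_char (set_like set_dislike : List Int) (a : List Int) (acc : Int) :
    a.foldl (fun happiness val =>
      if val ∈ set_like then happiness + 1
      else if val ∈ set_dislike then happiness - 1
      else happiness) acc
    = acc + ((a.filter (fun v => decide (v ∈ set_like))).length : Int)
          - ((a.filter (fun v => decide (v ∈ set_dislike ∧ v ∉ set_like))).length : Int) := by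
  induction a generalizing acc with
  | nil => simp
  | cons h t ih =>
    simp only [List.foldl_cons, ih]
    by_cases h1 : h ∈ set_like
    · simp [h1]; ring
    · by_cases h2 : h ∈ set_dislike
      · simp [h1, h2]; ring
      · simp [h1, h2]

-- the frequency dict looks up the array count
theorem counts_getD (array : List Int) (v : Int) :
    (array.foldl (fun d val => d.insert val (d.getD val 0 + 1)) PySem.Dict.empty).getD v 0
      = (array.count v : Int) := by
  rw [PySem.Dict.foldl_insert_getD_add_one_eq_counter, PySem.Dict.getD_counter]

-- ===== VERDICT (by name: the statement is the Claim_ definition above) =====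
theorem add_happiness_spec : Claim_equal_add_happiness := by
  intro array set_like set_dislike _
  unfold Spec_add_happiness add_happiness add_happiness_alt
  simp only []
  have hmap : ∀ (L : List Int),
      (L.map (fun x => (array.foldl (fun d val => d.insert val (d.getD val 0 + 1)) PySem.Dict.empty).getD x 0))
        = L.map (fun x => (array.count x : Int)) := by
    intro L
    exact List.map_congr_left (fun x _ => counts_getD array x)
  rw [hmap, hmap, a_char]
  rw [sum_counts _ (PySem.Set.nodup_ofList set_like) array,
      sum_counts _ (PySem.Set.nodup_diff _ _ (PySem.Set.nodup_ofList set_dislike)) array]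
  have hlike : array.filter (fun v => decide (v ∈ set_like))
      = array.filter (fun v => decide (v ∈ PySem.Set.ofList set_like)) := by
    apply List.filter_congr
    intro v _
    simp [PySem.Set.mem_ofList]
  have hdis : array.filter (fun v => decide (v ∈ set_dislike ∧ v ∉ set_like))
      = array.filter (fun v => decide (v ∈ PySem.Set.diff (PySem.Set.ofList set_dislike) (PySem.Set.ofList set_like))) := by
    apply List.filter_congr
    intro v _
    simp [PySem.Set.mem_diff, PySem.Set.mem_ofList]
  rw [hlike, hdis]
  ring
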